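-- pv_equiv track=rewrite | github.com/jdyepest/entrega_2_micropryecto | data_lake/scripts/build_task1.py | chunk_words
-- ===== SOURCE A (Python) =====
-- TARGET_WORDS = 600  # used for splitting long sections more evenly
--
-- def chunk_words(words: list[str], min_w: int, max_w: int) -> list[list[str]]:
--     """
--     Chunk a list of words into chunks within [min_w, max_w] where possible.
--     """
--     chunks: list[list[str]] = []
--     i = 0
--     n = len(words)
--
--     while i < n:
--         remaining = n - i
--         if remaining <= max_w:
--             # last chunk
--             if remaining >= min_w:
--                 chunks.append(words[i:])
--             # else: too short tail -> drop it (or merge backward; keep simple for baseline)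
--             break
--
--         # take a target chunk
--         take = min(max_w, max(min_w, TARGET_WORDS))
--         chunks.append(words[i:i + take])
--         i += take
--
--     return chunks
-- ===== SOURCE B (Python) =====
-- TARGET_WORDS = 600  # used for splitting long sections more evenly
--
-- def chunk_words(words: list[str], min_w: int, max_w: int) -> list[list[str]]:
--     """Chunk words via a closed-form full-chunk count instead of a running-index loop."""
--     if not words:
--         return []
--     n = len(words)
--     t = min(max_w, max(min_w, TARGET_WORDS))
--     full = 0 if n <= max_w else (n - max_w + t - 1) // t
--     chunks = [words[j * t:(j + 1) * t] for j in range(full)]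
--     tail = full * t
--     if n - tail >= min_w:
--         chunks.append(words[tail:])
--     return chunks
-- ===== Notes on version B (the rewrite author's own statement) =====
-- stated objective: alternative
-- what changed: Replaces A's running-index while-loop with break by a closed-form count of full chunks (ceiling division), a comprehension building them by index, and one explicit tail check.
import Mathlib
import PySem

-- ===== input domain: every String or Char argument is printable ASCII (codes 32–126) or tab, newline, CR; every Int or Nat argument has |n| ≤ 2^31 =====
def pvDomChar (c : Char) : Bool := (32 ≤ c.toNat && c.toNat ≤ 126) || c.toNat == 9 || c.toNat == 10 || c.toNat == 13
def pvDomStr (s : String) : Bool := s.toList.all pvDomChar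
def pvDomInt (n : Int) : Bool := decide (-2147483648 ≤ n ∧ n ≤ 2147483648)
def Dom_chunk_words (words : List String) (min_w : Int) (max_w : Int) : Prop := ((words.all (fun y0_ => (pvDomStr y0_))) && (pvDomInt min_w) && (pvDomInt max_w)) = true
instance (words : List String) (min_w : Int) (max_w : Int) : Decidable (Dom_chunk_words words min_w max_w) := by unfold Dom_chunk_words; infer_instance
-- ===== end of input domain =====

-- B replaces A's running-index while-loop by a closed-form count of full chunks and a
-- comprehension over their indices (objective: alternative decomposition, same cost).

-- ===== PORT A =====
-- A's while-loop; the Nat fuel only makes the recursion total (A's loop terminates on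
-- every input admitted by Pre_; words.length + 1 iterations always suffice there).
def chunkLoopA (words : List String) (min_w : Int) (max_w : Int) (n : Int) :
    Nat → Int → List (List String) → List (List String)
  | 0, _, chunks => chunks
  | fuel + 1, i, chunks =>
    if i < n then
      if n - i ≤ max_w then
        -- last chunk
        if n - i ≥ min_w then chunks ++ [PySem.List.slice words (some i) none] else chunks
      else
        let take := min max_w (max min_w 600)
        chunkLoopA words min_w max_w n fuel (i + take)
          (chunks ++ [PySem.List.slice words (some i) (some (i + take))])
    else chunks

def chunk_words (words : List String) (min_w : Int) (max_w : Int) : List (List String) :=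
  chunkLoopA words min_w max_w (words.length : Int) (words.length + 1) 0 []

-- ===== PORT B =====
def chunk_words_alt (words : List String) (min_w : Int) (max_w : Int) : List (List String) :=
  if words = [] then []
  else
    let n : Int := (words.length : Int)
    let t : Int := min max_w (max min_w 600)
    let full : Int := if n ≤ max_w then 0 else PySem.Int.floordiv (n - max_w + t - 1) t
    let chunks := (PySem.List.pyRange 0 full 1).map
      (fun j => PySem.List.slice words (some (j * t)) (some ((j + 1) * t)))
    let tail := full * t
    if n - tail ≥ min_w then chunks ++ [PySem.List.slice words (some tail) none] else chunks

-- ===== PRECONDITION & SPEC =====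
-- Pre_ excludes exactly the inputs on which A never returns: for nonempty words and
-- max_w ≤ 0 the chunk size is ≤ 0 and A's while-loop runs forever.
def Pre_chunk_words (words : List String) (min_w : Int) (max_w : Int) : Prop :=
  words = [] ∨ 1 ≤ max_w
instance (words : List String) (min_w : Int) (max_w : Int) : Decidable (Pre_chunk_words words min_w max_w) := by unfold Pre_chunk_words; infer_instance

def pvWitness_chunk_words : List String × Int × Int := (["a", "b", "c"], 1, 2)

def Spec_chunk_words (words : List String) (min_w : Int) (max_w : Int) (out : List (List String)) : Prop := out = chunk_words_alt words min_w max_w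
instance (words : List String) (min_w : Int) (max_w : Int) (out : List (List String)) : Decidable (Spec_chunk_words words min_w max_w out) := by unfold Spec_chunk_words; infer_instance

-- ===== CLAIM (what is proved, stated in full; the proofs are below) =====
def Claim_equal_chunk_words : Prop := ∀ (words : List String) (min_w : Int) (max_w : Int), Dom_chunk_words words min_w max_w → Pre_chunk_words words min_w max_w → Spec_chunk_words words min_w max_w (chunk_words words min_w max_w)

-- ===== LEMMAS AND PROOFS =====

-- Loop invariant: at index i = j * t, A's loop appends exactly one slice per remaining
-- full-chunk index in [j, F) and then the tail chunk iff the remainder reaches min_w.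
theorem chunkLoopA_eq (words : List String) (min_w max_w t F : Int)
    (ht : t = min max_w (max min_w 600))
    (hFn : F * t < (words.length : Int))
    (hlow : (words.length : Int) - max_w ≤ F * t)
    (hfull : ∀ j : Int, 0 ≤ j → j < F → j * t < (words.length : Int) - max_w) :
    ∀ (fuel : Nat) (j : Int) (chunks : List (List String)), 0 ≤ j → j ≤ F →
      (F - j).toNat < fuel →
      chunkLoopA words min_w max_w (words.length : Int) fuel (j * t) chunks =
        chunks
          ++ (PySem.List.pyRange j F 1).map
              (fun q => PySem.List.slice words (some (q * t)) (some ((q + 1) * t)))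
          ++ (if (words.length : Int) - F * t ≥ min_w
              then [PySem.List.slice words (some (F * t)) none] else []) := by
  intro fuel
  induction fuel with
  | zero => intro j chunks _ _ hlt; omega
  | succ fuel ih =>
    intro j chunks hj0 hjF hlt
    by_cases hjeq : j = F
    · subst hjeq
      rw [PySem.List.pyRange_one_eq_nil (le_refl j)]
      have h1 : j * t < (words.length : Int) := hFn
      have h2 : (words.length : Int) - j * t ≤ max_w := by omega
      simp only [chunkLoopA, if_pos h1, if_pos h2]
      split <;> simp
    · have hjF' : j < F := lt_of_le_of_ne hjF hjeq
      have hrec : j * t < (words.length : Int) - max_w := hfull j hj0 hjF'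
      have h1 : j * t < (words.length : Int) := by omega
      have h2 : ¬ ((words.length : Int) - j * t ≤ max_w) := by omega
      simp only [chunkLoopA, if_pos h1, if_neg h2, ← ht]
      have hstep : j * t + t = (j + 1) * t := by ring
      rw [hstep,
        ih (j + 1) (chunks ++ [PySem.List.slice words (some (j * t)) (some ((j + 1) * t))])
          (by omega) (by omega) (by omega)]
      rw [PySem.List.pyRange_one_cons hjF']
      simp

theorem chunk_words_spec_aux (words : List String) (min_w max_w : Int)
    (hpre : Pre_chunk_words words min_w max_w) :
    chunk_words words min_w max_w = chunk_words_alt words min_w max_w := by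
  by_cases hnil : words = []
  · subst hnil
    simp [chunk_words, chunkLoopA, chunk_words_alt]
  · have hmax : 1 ≤ max_w := by
      cases hpre with
      | inl h => exact absurd h hnil
      | inr h => exact h
    have hn1 : 1 ≤ (words.length : Int) := by
      have : words.length ≠ 0 := fun h => hnil (List.length_eq_zero_iff.mp h)
      omega
    set n : Int := (words.length : Int) with hn
    set t : Int := min max_w (max min_w 600) with htdef
    have ht1 : 1 ≤ t := by
      have h600 : (600 : Int) ≤ max min_w 600 := le_max_right _ _
      have := min_le_left max_w (max min_w 600)
      omega
    have htw : t ≤ max_w := min_le_left _ _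
    set F : Int := if n ≤ max_w then 0 else PySem.Int.floordiv (n - max_w + t - 1) t with hFdef
    -- the three arithmetic facts about F
    have hF0 : 0 ≤ F := by
      rw [hFdef]; split
      · omega
      · rw [PySem.Int.floordiv_eq_ediv_of_pos (by omega)]
        exact Int.ediv_nonneg (by omega) (by omega)
    have hFhigh : F = 0 ∨ F * t ≤ n - max_w + t - 1 := by
      rw [hFdef]; split
      · left; rfl
      · right
        rw [PySem.Int.floordiv_eq_ediv_of_pos (by omega)]
        exact Int.ediv_mul_le _ (by omega)
    have hlow : n - max_w ≤ F * t := by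
      rw [hFdef]; split
      · omega
      · rw [PySem.Int.floordiv_eq_ediv_of_pos (by omega)]
        have := Int.lt_ediv_add_one_mul_self (n - max_w + t - 1) (show 0 < t by omega)
        have hexp : ((n - max_w + t - 1) / t + 1) * t = (n - max_w + t - 1) / t * t + t := by ring
        omega
    have hFn : F * t < n := by
      cases hFhigh with
      | inl h => rw [h]; omega
      | inr h => omega
    have hfull : ∀ j : Int, 0 ≤ j → j < F → j * t < n - max_w := by
      intro j hj0 hjF
      have hmul : j * t ≤ (F - 1) * t :=
        mul_le_mul_of_nonneg_right (by omega) (by omega)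
      have hexp : (F - 1) * t = F * t - t := by ring
      cases hFhigh with
      | inl h => omega
      | inr h => omega
    have hFle : F ≤ F * t := le_mul_of_one_le_right hF0 ht1
    have hmain := chunkLoopA_eq words min_w max_w t F htdef hFn hlow hfull
      (words.length + 1) 0 [] (le_refl 0) hF0 (by omega)
    rw [zero_mul] at hmain
    rw [chunk_words, ← hn, hmain, chunk_words_alt, if_neg hnil]
    simp only [← hn, ← htdef, ← hFdef]
    split <;> simp

-- ===== VERDICT (by name: the statement is the Claim_ definition above) =====
theorem chunk_words_spec : Claim_equal_chunk_words := by
  intro words min_w max_w _ hpre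
  exact chunk_words_spec_aux words min_w max_w hpre
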